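-- pv_equiv track=rewrite | github.com/ThomasBosboom/ThesisSpace | simulations/src/dynamic_models/test.py | generate_boundary_tuples
-- ===== SOURCE A (Python) =====
-- def generate_boundary_tuples(input_dict):
--     boundaries = []
--     start = None
--     for i, (key, value) in enumerate(input_dict.items()):
--         if i == 0 and value:  # Handle the first element separately
--             start = key
--         elif value and not input_dict[list(input_dict.keys())[i - 1]]:  # Transition from False to True
--             start = key
--         elif not value and input_dict[list(input_dict.keys())[i - 1]]:  # Transition from True to False
--             boundaries.append((start, list(input_dict.keys())[i - 1]))
--             start = None
--     # If the last region continues until the end, add it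
--     if start is not None:
--         boundaries.append((start, list(input_dict.keys())[-1]))
--     return boundaries
-- ===== SOURCE B (Python) =====
-- def generate_boundary_tuples(input_dict):
--     keys = list(input_dict)
--     vals = list(input_dict.values())
--     starts = [k for k, v, pv in zip(keys, vals, [False] + vals) if v and not pv]
--     ends = [k for k, v, nv in zip(keys, vals, vals[1:] + [False]) if v and not nv]
--     return list(zip(starts, ends))
-- ===== Notes on version B (the rewrite author's own statement) =====
-- stated objective: faster
-- what changed: B replaces A's stateful transition-detecting loop (which rebuilds list(keys) every iteration) by two staged comprehensions over value-shifted zips that collect run starts and run ends independently, then zips them into pairs.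
-- outside the precondition, e.g. on generate_boundary_tuples({1: False, 2: True, 3: True}): A returns [(None, 3), (2, 3)], B returns [(2, 3)]
import Mathlib
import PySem

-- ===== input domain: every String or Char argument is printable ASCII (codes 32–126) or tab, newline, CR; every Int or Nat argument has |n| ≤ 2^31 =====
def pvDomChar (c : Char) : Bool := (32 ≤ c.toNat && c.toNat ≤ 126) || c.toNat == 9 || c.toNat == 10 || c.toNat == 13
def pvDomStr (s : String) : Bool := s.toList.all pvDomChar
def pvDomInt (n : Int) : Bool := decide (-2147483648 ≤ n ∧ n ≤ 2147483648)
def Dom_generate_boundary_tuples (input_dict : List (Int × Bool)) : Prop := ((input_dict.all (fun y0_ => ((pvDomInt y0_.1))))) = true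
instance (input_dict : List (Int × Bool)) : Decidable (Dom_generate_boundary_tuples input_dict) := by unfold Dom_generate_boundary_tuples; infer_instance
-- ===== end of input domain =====

-- B computes run starts and run ends in two staged passes over value-shifted zips and pairs them,
-- replacing A's stateful loop that rebuilds list(keys) each iteration (quadratic rebuild removed).


-- ===== PORT A =====
-- loop body of A; the `.getD 0` defaults stand for Python's None / IndexError cases, which Pre_ keeps unreachable
def aStep (d : PySem.Dict Int Bool) (s : List (Int × Int) × Option Int) (ikv : Int × (Int × Bool)) :
    List (Int × Int) × Option Int :=
  let i := ikv.1
  let key := ikv.2.1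
  let value := ikv.2.2
  if i == 0 && value then (s.1, some key)
  else if value && !(((PySem.List.pyGet? d.keys (i - 1)).bind d.get?).getD false) then (s.1, some key)
  else if !value && (((PySem.List.pyGet? d.keys (i - 1)).bind d.get?).getD false) then
    (s.1 ++ [(s.2.getD 0, (PySem.List.pyGet? d.keys (i - 1)).getD 0)], none)
  else s

def generate_boundary_tuples (input_dict : List (Int × Bool)) : List (Int × Int) :=
  let d := PySem.Dict.ofList input_dict
  let st := (PySem.List.enumerate d.items 0).foldl (aStep d) ([], none)
  match st.2 with
  | some start => st.1 ++ [(start, (PySem.List.pyGet? d.keys (-1)).getD 0)]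
  | none => st.1

-- ===== PORT B =====
-- Source B: starts/ends are comprehensions over zip(keys, vals, shifted-vals); a 3-way zip is nested pairs here.
-- vals[1:] is PySem.List.slice vals 1 none; [False] + vals is false :: vals.
def generate_boundary_tuples_alt (input_dict : List (Int × Bool)) : List (Int × Int) :=
  let d := PySem.Dict.ofList input_dict
  let keys := d.keys
  let vals := d.values
  let starts := ((keys.zip (vals.zip (false :: vals))).filter
      (fun x => x.2.1 && !x.2.2)).map (fun x => x.1)
  let ends := ((keys.zip (vals.zip (PySem.List.slice vals (some 1) none ++ [false]))).filter
      (fun x => x.2.1 && !x.2.2)).map (fun x => x.1)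
  starts.zip ends

-- ===== PRECONDITION & SPEC =====
-- Pre_ excludes dicts whose first value is False while their last value is True: there A's negative-index
-- wraparound at i == 0 appends a (None, last_key) pair, which is not a list of int pairs.
def Pre_generate_boundary_tuples (input_dict : List (Int × Bool)) : Prop :=
  ¬(((PySem.Dict.ofList input_dict).items.head?.map Prod.snd = some false) ∧
    ((PySem.Dict.ofList input_dict).items.getLast?.map Prod.snd = some true))
instance (input_dict : List (Int × Bool)) : Decidable (Pre_generate_boundary_tuples input_dict) := by
  unfold Pre_generate_boundary_tuples; infer_instance

def pvWitness_generate_boundary_tuples : (List (Int × Bool)) := ([(1, true), (2, false), (3, true)])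

def Spec_generate_boundary_tuples (input_dict : List (Int × Bool)) (out : List (Int × Int)) : Prop := out = generate_boundary_tuples_alt input_dict
instance (input_dict : List (Int × Bool)) (out : List (Int × Int)) : Decidable (Spec_generate_boundary_tuples input_dict out) := by unfold Spec_generate_boundary_tuples; infer_instance

-- ===== CLAIM (what is proved, stated in full; the proofs are below) =====
def Claim_equal_generate_boundary_tuples : Prop := ∀ (input_dict : List (Int × Bool)), Dom_generate_boundary_tuples input_dict → Pre_generate_boundary_tuples input_dict → Spec_generate_boundary_tuples input_dict (generate_boundary_tuples input_dict)

-- ===== LEMMAS AND PROOFS =====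

-- proof-only intermediate: the single-pass state machine both programs are reduced to.
-- state = (boundaries, start, prev_key, prev_val)
def bStep (s : List (Int × Int) × Option Int × Option Int × Bool) (kv : Int × Bool) :
    List (Int × Int) × Option Int × Option Int × Bool :=
  let key := kv.1
  let value := kv.2
  let bnd := s.1
  let start := s.2.1
  let prev_key := s.2.2.1
  let prev_val := s.2.2.2
  if value && !prev_val then (bnd, some key, some key, value)
  else if prev_val && !value then (bnd ++ [(start.getD 0, prev_key.getD 0)], start, some key, value)
  else (bnd, start, some key, value)

def finishB (st : List (Int × Int) × Option Int × Option Int × Bool) : List (Int × Int) :=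
  if st.2.2.2 then st.1 ++ [(st.2.1.getD 0, st.2.2.1.getD 0)] else st.1

def bFold (input_dict : List (Int × Bool)) : List (Int × Int) :=
  finishB ((PySem.Dict.ofList input_dict).items.foldl bStep ([], none, none, false))

-- canonical run starts / run ends of an items list (pv = value just before the list)
def runStarts (pv : Bool) : List (Int × Bool) → List Int
  | [] => []
  | (k, v) :: t => (if v && !pv then [k] else []) ++ runStarts v t

def runEnds : List (Int × Bool) → List Int
  | [] => []
  | (k, v) :: t => (if v && !((t.headD (0, false)).2) then [k] else []) ++ runEnds t

-- A's loop with the previous element's key/value carried explicitly (what aStep reads back via keys[i-1])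
def loopA (s : List (Int × Int) × Option Int) (pk : Int) (pv : Bool) :
    List (Int × Bool) → List (Int × Int) × Option Int
  | [] => s
  | (k, v) :: t =>
      loopA (if v && !pv then (s.1, some k)
             else if !v && pv then (s.1 ++ [(s.2.getD 0, pk)], none)
             else s) k v t

theorem foldl_aStep_eq_loopA (d : PySem.Dict Int Bool) (hnd : d.keys.Nodup)
    (t : List (Int × Bool)) :
    ∀ (pre : List (Int × Bool)) (pk : Int) (pv : Bool) (s : List (Int × Int) × Option Int),
      d.items = pre ++ t → pre.getLast? = some (pk, pv) →
      (PySem.List.enumerate t (pre.length : Int)).foldl (aStep d) s = loopA s pk pv t := by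
  induction t with
  | nil =>
    intro pre pk pv s _ _
    simp [PySem.List.enumerate_nil, loopA]
  | cons kv t ih =>
    obtain ⟨k, v⟩ := kv
    intro pre pk pv s hitems hlast
    have hne : pre ≠ [] := by
      intro h; rw [h] at hlast; simp at hlast
    have hlen : 1 ≤ pre.length := List.length_pos_iff.mpr hne
    have hkeys : d.keys = (pre ++ (k, v) :: t).map Prod.fst := by
      rw [show d.keys = d.items.map Prod.fst from rfl, hitems]
    have hget : PySem.List.pyGet? d.keys ((pre.length : Int) - 1) = some pk := by
      rw [hkeys, show ((pre.length : Int) - 1) = ((pre.length - 1 : Nat) : Int) by omega,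
        PySem.List.pyGet?_natCast, List.map_append,
        List.getElem?_append_left (by simp; omega), List.getElem?_map]
      rw [show pre[pre.length - 1]? = pre.getLast? from (List.getLast?_eq_getElem? ..).symm, hlast]
      rfl
    have hmem : (pk, pv) ∈ d.items := by
      rw [hitems]; exact List.mem_append_left _ (List.mem_of_getLast? hlast)
    have hgv : d.get? pk = some pv := PySem.Dict.get?_of_mem_items d hmem hnd
    have hnz : (((pre.length : Int)) == 0) = false := by
      simp only [beq_eq_false_iff_ne, ne_eq]; omega
    rw [PySem.List.enumerate_cons, List.foldl_cons]
    have hstep : aStep d s ((pre.length : Int), (k, v)) =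
        (if v && !pv then (s.1, some k)
         else if !v && pv then (s.1 ++ [(s.2.getD 0, pk)], none)
         else s) := by
      simp only [aStep, hget, hgv, hnz, Option.bind_some, Option.getD_some, Bool.false_and,
        if_false, Bool.false_eq_true]
    rw [hstep, show ((pre.length : Int) + 1) = (((pre ++ [(k, v)]).length : Nat) : Int) by simp]
    exact ih (pre ++ [(k, v)]) k v _ (by rw [hitems]; simp) (List.getLast?_concat)

theorem rel_loopA_foldB (t : List (Int × Bool)) :
    ∀ (bnd : List (Int × Int)) (startA startB : Option Int) (pk : Int) (pv : Bool),
      (pv = true → startA = startB ∧ startA ≠ none) → (pv = false → startA = none) →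
      (loopA (bnd, startA) pk pv t).1 = (t.foldl bStep (bnd, startB, some pk, pv)).1 ∧
      (t.foldl bStep (bnd, startB, some pk, pv)).2.2.1 = some (t.getLastD (pk, pv)).1 ∧
      (t.foldl bStep (bnd, startB, some pk, pv)).2.2.2 = (t.getLastD (pk, pv)).2 ∧
      ((t.getLastD (pk, pv)).2 = true →
        (loopA (bnd, startA) pk pv t).2 = (t.foldl bStep (bnd, startB, some pk, pv)).2.1 ∧
        (loopA (bnd, startA) pk pv t).2 ≠ none) ∧
      ((t.getLastD (pk, pv)).2 = false → (loopA (bnd, startA) pk pv t).2 = none) := by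
  induction t with
  | nil =>
    intro bnd startA startB pk pv h1 h2
    exact ⟨rfl, rfl, rfl, h1, h2⟩
  | cons kv t ih =>
    obtain ⟨k, v⟩ := kv
    intro bnd startA startB pk pv h1 h2
    simp only [loopA, List.foldl_cons, List.getLastD_cons]
    cases pv <;> cases v <;>
      simp only [bStep, Bool.not_false, Bool.not_true, Bool.and_true, Bool.and_false,
        if_true, Bool.and_self]
    · exact ih bnd startA startB k false (by simp) (fun _ => h2 rfl)
    · exact ih bnd (some k) (some k) k true (fun _ => ⟨rfl, by simp⟩) (by simp)
    · obtain ⟨hse, _⟩ := h1 rfl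
      rw [hse]
      exact ih (bnd ++ [(startB.getD 0, (some pk).getD 0)]) none startB k false (by simp)
        (fun _ => rfl)
    · exact ih bnd startA startB k true (fun _ => h1 rfl) (by simp)

theorem A_eq_bFold (input_dict : List (Int × Bool))
    (hpre : Pre_generate_boundary_tuples input_dict) :
    generate_boundary_tuples input_dict = bFold input_dict := by
  simp only [generate_boundary_tuples, bFold, finishB]
  have hnd : (PySem.Dict.ofList input_dict).keys.Nodup := PySem.Dict.nodup_keys_ofList input_dict
  unfold Pre_generate_boundary_tuples at hpre
  cases hitems : (PySem.Dict.ofList input_dict).items with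
  | nil =>
    simp [PySem.List.enumerate_nil]
  | cons h0 rest =>
    obtain ⟨k0, v0⟩ := h0
    rcases hL : rest.getLastD (k0, v0) with ⟨lk, lv⟩
    have hlastitems : (PySem.Dict.ofList input_dict).items.getLast? = some (lk, lv) := by
      rw [hitems, List.getLast?_cons, ← List.getLastD_eq_getLast?, hL]
    have hkeylast : (PySem.Dict.ofList input_dict).keys.getLast? = some lk := by
      rw [show (PySem.Dict.ofList input_dict).keys
            = (PySem.Dict.ofList input_dict).items.map Prod.fst from rfl,
        List.getLast?_map, hlastitems, Option.map_some]
    have hglast : (PySem.Dict.ofList input_dict).get? lk = some lv :=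
      PySem.Dict.get?_of_mem_items _ (List.mem_of_getLast? hlastitems) hnd
    have hgetm1 : PySem.List.pyGet? (PySem.Dict.ofList input_dict).keys (-1) = some lk := by
      rw [PySem.List.pyGet?_neg_one, hkeylast]
    -- under Pre_: if the first value is false, the last value is false too
    have hcorner : v0 = false → lv = false := by
      intro h0
      by_contra hlv
      exact hpre ⟨by rw [hitems, h0]; rfl, by rw [hlastitems]; simp at hlv ⊢; exact hlv⟩
    -- A's first iteration
    have hstep0 : aStep (PySem.Dict.ofList input_dict) ([], none) ((0 : Int), (k0, v0))
        = ([], if v0 then some k0 else none) := by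
      cases v0 with
      | true => simp [aStep]
      | false =>
        have : lv = false := hcorner rfl
        simp [aStep, show ((0 : Int) - 1) = (-1 : Int) from rfl, hgetm1, hglast, this]
    -- the state machine's first iteration
    have hstepB0 : bStep ([], none, none, false) (k0, v0)
        = ([], (if v0 then some k0 else none), some k0, v0) := by
      cases v0 <;> simp [bStep]
    rw [PySem.List.enumerate_cons, List.foldl_cons, hstep0, List.foldl_cons, hstepB0]
    rw [show ((0 : Int) + 1) = ((([((k0 : Int), v0)].length : Nat)) : Int) by simp]
    rw [foldl_aStep_eq_loopA (PySem.Dict.ofList input_dict) hnd rest [(k0, v0)] k0 v0 _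
      (by rw [hitems]; rfl) rfl]
    obtain ⟨hbnd, hpk, hpv, htrue, hfalse⟩ :=
      rel_loopA_foldB rest [] (if v0 then some k0 else none) (if v0 then some k0 else none) k0 v0
        (by intro h; rw [h]; simp) (by intro h; rw [h]; simp)
    rw [hL] at hpk hpv htrue hfalse
    cases lv with
    | true =>
      obtain ⟨hse, hsn⟩ := htrue rfl
      rcases hsA : (loopA ([], if v0 then some k0 else none) k0 v0 rest).2 with _ | s0
      · exact absurd hsA hsn
      · rw [hsA] at hse
        simp only [hpv, if_true, hbnd, ← hse, hpk, hgetm1]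
        rfl
    | false =>
      simp only [hfalse rfl, hpv, hbnd, if_false, Bool.false_eq_true]

-- the state machine (with its final flush) computes runStarts zipped with runEnds
theorem foldB_zip (t : List (Int × Bool)) :
    ∀ (bnd : List (Int × Int)) (s pk : Option Int) (pv : Bool),
      finishB (t.foldl bStep (bnd, s, pk, pv)) =
        bnd ++ (((if pv then [s.getD 0] else []) ++ runStarts pv t).zip
          (if pv then runEnds ((pk.getD 0, true) :: t) else runEnds t)) := by
  induction t with
  | nil =>
    intro bnd s pk pv
    cases pv <;> simp [finishB, runStarts, runEnds]
  | cons kv t ih =>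
    obtain ⟨k, v⟩ := kv
    intro bnd s pk pv
    rw [List.foldl_cons]
    cases pv <;> cases v <;>
      simp only [bStep, Bool.not_false, Bool.not_true, Bool.and_true, Bool.and_false,
        Bool.and_self, if_true] <;>
      rw [ih] <;>
      cases t <;>
      simp [runStarts, runEnds, List.zip]

-- the starts comprehension of Source B equals runStarts
theorem startsEq (L : List (Int × Bool)) :
    ∀ pv : Bool,
      (((L.map Prod.fst).zip ((L.map Prod.snd).zip (pv :: L.map Prod.snd))).filter
        (fun x => x.2.1 && !x.2.2)).map (fun x => x.1) = runStarts pv L := by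
  induction L with
  | nil => intro pv; rfl
  | cons kv t ih =>
    obtain ⟨k, v⟩ := kv
    intro pv
    simp only [List.map_cons, List.zip_cons_cons, List.filter_cons, runStarts]
    cases v <;> cases pv <;> simp [ih]

-- the ends comprehension of Source B equals runEnds
theorem endsEq (L : List (Int × Bool)) :
    (((L.map Prod.fst).zip ((L.map Prod.snd).zip ((L.map Prod.snd).drop 1 ++ [false]))).filter
      (fun x => x.2.1 && !x.2.2)).map (fun x => x.1) = runEnds L := by
  induction L with
  | nil => rfl
  | cons kv t ih =>
    obtain ⟨k, v⟩ := kv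
    simp only [List.map_cons, List.drop_one, List.tail_cons, runEnds]
    cases t with
    | nil => cases v <;> simp [runEnds]
    | cons kv' t' =>
      obtain ⟨k', v'⟩ := kv'
      simp only [List.map_cons, List.cons_append, List.zip_cons_cons, List.filter_cons,
        List.headD_cons, List.drop_one, List.tail_cons] at ih ⊢
      cases v <;> cases v' <;> simp_all

theorem bFold_eq_alt (input_dict : List (Int × Bool)) :
    bFold input_dict = generate_boundary_tuples_alt input_dict := by
  simp only [bFold, generate_boundary_tuples_alt]
  rw [foldB_zip]
  simp only [if_false, List.nil_append, Bool.false_eq_true]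
  rw [show (PySem.Dict.ofList input_dict).keys
        = (PySem.Dict.ofList input_dict).items.map Prod.fst from rfl,
    show (PySem.Dict.ofList input_dict).values
        = (PySem.Dict.ofList input_dict).items.map Prod.snd from rfl,
    PySem.List.slice_from_one, ← List.drop_one,
    startsEq _ false, endsEq]

-- ===== VERDICT (by name: the statement is the Claim_ definition above) =====
theorem generate_boundary_tuples_spec : Claim_equal_generate_boundary_tuples := by
  intro input_dict _hdom hpre
  unfold Spec_generate_boundary_tuples
  rw [A_eq_bFold input_dict hpre, bFold_eq_alt]
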